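-- pv_equiv track=rewrite | github.com/borchand/aigs | aigs/games.py | connect_four_test
-- ===== SOURCE A (Python) =====
-- def connect_four_test(v):
--     if len(v) < 4:
--         return False
--
--     for i in range(len(v) - 3):
--         if v[i] and v[i + 1] and v[i + 2] and v[i + 3]:
--             return True
--     else:
--         return False
-- ===== SOURCE B (Python) =====
-- def connect_four_test(v):
--     count = 0
--     for x in v:
--         count = count + 1 if x else 0
--         if count == 4:
--             return True
--     return False
-- ===== Notes on version B (the rewrite author's own statement) =====
-- stated objective: simpler
-- what changed: Replaces the index-windowed scan (checking v[i..i+3] for each i) by a single pass over the elements maintaining a running streak counter that returns True when it reaches 4.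
import Mathlib
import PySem

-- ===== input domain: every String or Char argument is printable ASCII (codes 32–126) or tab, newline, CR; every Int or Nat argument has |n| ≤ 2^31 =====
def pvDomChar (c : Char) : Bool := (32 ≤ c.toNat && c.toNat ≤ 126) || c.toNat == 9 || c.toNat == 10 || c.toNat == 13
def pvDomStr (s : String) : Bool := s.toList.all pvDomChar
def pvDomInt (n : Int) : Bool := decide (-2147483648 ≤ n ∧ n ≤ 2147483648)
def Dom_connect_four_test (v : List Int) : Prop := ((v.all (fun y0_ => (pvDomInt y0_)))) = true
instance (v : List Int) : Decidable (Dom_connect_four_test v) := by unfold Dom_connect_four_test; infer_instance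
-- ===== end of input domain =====

-- B replaces A's index-windowed scan by a simpler single pass keeping a streak counter; same return value on all inputs.


-- ===== PORT A =====
-- the `for i in range(len(v) - 3)` loop; indices i..i+3 are always in range when the
-- window branch is taken (guarded by i + 3 < v.length), so v[i] is ported as getD (exact here)
def connect_four_testLoop (v : List Int) (i : Nat) : Bool :=
  if i + 3 < v.length then
    if (v.getD i 0 != 0) && (v.getD (i+1) 0 != 0) && (v.getD (i+2) 0 != 0) && (v.getD (i+3) 0 != 0) then
      true
    else
      connect_four_testLoop v (i+1)
  else false
termination_by v.length - i
decreasing_by omega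

def connect_four_test (v : List Int) : Bool :=
  if v.length < 4 then false
  else connect_four_testLoop v 0

-- ===== PORT B =====
def connect_four_testAltLoop (v : List Int) (count : Nat) : Bool :=
  match v with
  | [] => false
  | x :: rest =>
    let count' := if x != 0 then count + 1 else 0
    if count' == 4 then true else connect_four_testAltLoop rest count'

def connect_four_test_alt (v : List Int) : Bool :=
  connect_four_testAltLoop v 0

-- ===== PRECONDITION & SPEC =====
def Spec_connect_four_test (v : List Int) (out : Bool) : Prop := out = connect_four_test_alt v
instance (v : List Int) (out : Bool) : Decidable (Spec_connect_four_test v out) := by unfold Spec_connect_four_test; infer_instance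

-- ===== CLAIM (what is proved, stated in full; the proofs are below) =====
def Claim_equal_connect_four_test : Prop := ∀ (v : List Int), Dom_connect_four_test v → Spec_connect_four_test v (connect_four_test v)

-- ===== LEMMAS AND PROOFS =====

/-- Reference form: four consecutive `true`s in a Bool list (structural windows). -/
def win4b : List Bool → Bool
  | a :: b :: c :: d :: rest => (a && b && c && d) || win4b (b :: c :: d :: rest)
  | _ => false

theorem win4b_short (l : List Bool) (h : l.length ≤ 3) : win4b l = false := by
  match l with
  | [] => rfl
  | [_] => rfl
  | [_, _] => rfl
  | [_, _, _] => rfl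
  | _ :: _ :: _ :: _ :: _ => simp at h; omega

theorem win4b_f0 (l : List Bool) : win4b (false :: l) = win4b l := by
  match l with
  | a :: b :: c :: rest => simp [win4b]
  | [] => rfl
  | [_] => rfl
  | [_, _] => rfl

theorem win4b_f1 (l : List Bool) : win4b (true :: false :: l) = win4b l := by
  match l with
  | a :: b :: rest => simp [win4b, win4b_f0]
  | [] => rfl
  | [_] => rfl

theorem win4b_f2 (l : List Bool) : win4b (true :: true :: false :: l) = win4b l := by
  match l with
  | a :: rest => simp [win4b, win4b_f1]
  | [] => rfl

theorem win4b_f3 (l : List Bool) : win4b (true :: true :: true :: false :: l) = win4b l := by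
  simp [win4b, win4b_f2]

theorem win4b_false_pref (c : Nat) (hc : c ≤ 3) (l : List Bool) :
    win4b (List.replicate c true ++ false :: l) = win4b l := by
  interval_cases c <;>
    simp [List.replicate, win4b_f0, win4b_f1, win4b_f2, win4b_f3]

theorem loopA_eq (v : List Int) :
    ∀ (n i : Nat), v.length - i ≤ n →
      connect_four_testLoop v i = win4b ((v.drop i).map (fun x => x != 0)) := by
  intro n
  induction n with
  | zero =>
    intro i h
    rw [connect_four_testLoop, if_neg (by omega)]
    symm
    apply win4b_short
    simp
    omega
  | succ n ih =>
    intro i h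
    rw [connect_four_testLoop]
    by_cases hlt : i + 3 < v.length
    · rw [if_pos hlt]
      have h0 : i < v.length := by omega
      have h1 : i + 1 < v.length := by omega
      have h2 : i + 2 < v.length := by omega
      have h3 : i + 3 < v.length := hlt
      rw [ih (i+1) (by omega)]
      rw [List.drop_eq_getElem_cons h0, List.drop_eq_getElem_cons h1,
          List.drop_eq_getElem_cons h2, List.drop_eq_getElem_cons h3]
      simp only [List.map_cons, win4b]
      rw [List.getD_eq_getElem v 0 h0, List.getD_eq_getElem v 0 h1,
          List.getD_eq_getElem v 0 h2, List.getD_eq_getElem v 0 h3]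
      by_cases hcond : ((v[i] != 0) && (v[i+1] != 0) && (v[i+2] != 0) && (v[i+3] != 0)) = true
      · simp [hcond]
      · simp only [Bool.not_eq_true] at hcond
        simp [hcond]
    · rw [if_neg hlt]
      symm
      apply win4b_short
      simp
      omega

theorem loopB_eq (xs : List Int) :
    ∀ (c : Nat), c ≤ 3 →
      connect_four_testAltLoop xs c = win4b (List.replicate c true ++ xs.map (fun x => x != 0)) := by
  induction xs with
  | nil =>
    intro c hc
    rw [connect_four_testAltLoop]
    symm
    apply win4b_short
    simp
    omega
  | cons x xs ih =>
    intro c hc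
    rw [connect_four_testAltLoop]
    by_cases hx : (x != 0) = true
    · simp only [hx, if_true]
      by_cases hc4 : c = 3
      · subst hc4
        simp only [List.map_cons, hx]
        norm_num
        symm
        simp [List.replicate, win4b]
      · have hne : ¬ (c + 1 == 4) = true := by simp; omega
        simp only [hne]
        rw [ih (c+1) (by omega)]
        simp [List.map_cons, hx, List.replicate_succ' (n := c), List.append_assoc]
    · simp only [Bool.not_eq_true] at hx
      simp only [hx]
      norm_num
      rw [ih 0 (by omega)]
      simp only [List.replicate, List.nil_append, hx]
      rw [win4b_false_pref c hc]

-- ===== VERDICT (by name: the statement is the Claim_ definition above) =====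
theorem connect_four_test_spec : Claim_equal_connect_four_test := by
  intro v _
  unfold Spec_connect_four_test connect_four_test connect_four_test_alt
  have hb : connect_four_testAltLoop v 0 = win4b (v.map (fun x => x != 0)) := by
    simpa using loopB_eq v 0 (by omega)
  by_cases hlen : v.length < 4
  · rw [if_pos hlen, hb]
    symm
    apply win4b_short
    simp
    omega
  · rw [if_neg hlen, hb, loopA_eq v v.length 0 (by omega)]
    simp
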